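-- pv_equiv track=rewrite | github.com/KamleshKG/hello_world_app | _Utilities/DiagramTool/code_layout.py | auto_layout
-- ===== SOURCE A (Python) =====
-- def auto_layout(class_names: list, cols: int = 4,
--                 col_w: int = 280, row_h: int = 220,
--                 start_x: int = 60, start_y: int = 80) -> dict:
--     """
--     Returns {class_name: (x, y)} for each name.
--     Simple left-to-right, top-to-bottom grid.
--     For ≤ 6 classes uses 2 columns; for more uses `cols`.
--     """
--     n = len(class_names)
--     if n == 0:
--         return {}
--     if n <= 3:
--         cols = 1
--     elif n <= 6:
--         cols = 2
--     elif n <= 12: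
--         cols = 3
--     else:
--         cols = 4
--
--     positions = {}
--     for i, name in enumerate(class_names):
--         col = i % cols
--         row = i // cols
--         x = start_x + col * col_w
--         y = start_y + row * row_h
--         positions[name] = (x, y)
--
--     return positions
-- ===== SOURCE B (Python) =====
-- def auto_layout(class_names: list, cols: int = 4,
--                 col_w: int = 280, row_h: int = 220,
--                 start_x: int = 60, start_y: int = 80) -> dict:
--     n = len(class_names)
--     if n == 0:
--         return {}
--     if n <= 3:
--         cols = 1
--     elif n <= 6:
--         cols = 2
--     elif n <= 12:
--         cols = 3
--     else:
--         cols = 4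
--
--     positions = {}
--     idx = 0
--     rows = (n + cols - 1) // cols
--     for row in range(rows):
--         for col in range(cols):
--             if idx >= n:
--                 break
--             positions[class_names[idx]] = (start_x + col * col_w,
--                                            start_y + row * row_h)
--             idx += 1
--     return positions
-- ===== Notes on version B (the rewrite author's own statement) =====
-- stated objective: alternative
-- what changed: Replaces the flat enumerate loop that derives (row, col) from the index by divmod with an explicit row-major nested traversal over the grid (outer row loop, inner col loop with a running index and an early break), keeping the same cols cascade and empty short circuit.
import Mathlib
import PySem

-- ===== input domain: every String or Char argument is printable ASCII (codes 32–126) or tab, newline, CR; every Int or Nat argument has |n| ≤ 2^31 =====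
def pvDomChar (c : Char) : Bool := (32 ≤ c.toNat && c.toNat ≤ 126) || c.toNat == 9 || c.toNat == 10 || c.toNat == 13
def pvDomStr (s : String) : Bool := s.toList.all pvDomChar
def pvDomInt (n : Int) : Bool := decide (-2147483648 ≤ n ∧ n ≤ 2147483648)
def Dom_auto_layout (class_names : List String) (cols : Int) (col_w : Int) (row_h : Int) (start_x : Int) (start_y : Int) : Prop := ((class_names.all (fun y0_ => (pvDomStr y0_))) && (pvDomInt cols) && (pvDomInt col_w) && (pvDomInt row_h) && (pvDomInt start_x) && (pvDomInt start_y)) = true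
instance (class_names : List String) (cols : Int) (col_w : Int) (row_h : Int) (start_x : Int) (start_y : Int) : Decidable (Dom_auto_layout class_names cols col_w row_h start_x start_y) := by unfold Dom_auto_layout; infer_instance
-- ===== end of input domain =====

-- B replaces A's flat enumerate/divmod loop by an explicit row-major nested grid walk
-- (outer row loop, inner col loop with a running index and an early break); same result.

-- ===== PORT A =====
def auto_layout (class_names : List String) (cols : Int) (col_w : Int) (row_h : Int) (start_x : Int) (start_y : Int) : List (String × Int × Int) :=
  let n : Int := class_names.length
  if n == 0 then []
  else
    let cols : Int := if n ≤ 3 then 1 else if n ≤ 6 then 2 else if n ≤ 12 then 3 else 4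
    let positions : PySem.Dict String (Int × Int) :=
      (PySem.List.enumerate class_names 0).foldl (fun d p =>
        let col := PySem.Int.mod p.1 cols
        let row := PySem.Int.floordiv p.1 cols
        let x := start_x + col * col_w
        let y := start_y + row * row_h
        d.insert p.2 (x, y)) PySem.Dict.empty
    positions.items

-- ===== PORT B =====
-- inner `for col in range(cols)` loop; breaks (returns) once idx >= n.
-- class_names[idx] is only reached with 0 ≤ idx < n, where pyGetD is exact.
def bInner (class_names : List String) (n cols col_w row_h start_x start_y row : Int) :
    List Int → Int → PySem.Dict String (Int × Int) → Int × PySem.Dict String (Int × Int)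
  | [], idx, d => (idx, d)
  | col :: rest, idx, d =>
    if n ≤ idx then (idx, d)
    else bInner class_names n cols col_w row_h start_x start_y row rest (idx + 1)
      (d.insert (PySem.List.pyGetD class_names idx "")
        (start_x + col * col_w, start_y + row * row_h))

-- outer `for row in range(rows)` loop carrying (idx, positions).
def bOuter (class_names : List String) (n cols col_w row_h start_x start_y : Int) :
    List Int → Int → PySem.Dict String (Int × Int) → PySem.Dict String (Int × Int)
  | [], _, d => d
  | row :: rest, idx, d =>
    let p := bInner class_names n cols col_w row_h start_x start_y row
      (PySem.List.pyRange 0 cols 1) idx d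
    bOuter class_names n cols col_w row_h start_x start_y rest p.1 p.2

def auto_layout_alt (class_names : List String) (cols : Int) (col_w : Int) (row_h : Int) (start_x : Int) (start_y : Int) : List (String × Int × Int) :=
  let n : Int := class_names.length
  if n == 0 then []
  else
    let cols : Int := if n ≤ 3 then 1 else if n ≤ 6 then 2 else if n ≤ 12 then 3 else 4
    let rows : Int := PySem.Int.floordiv (n + cols - 1) cols
    (bOuter class_names n cols col_w row_h start_x start_y
      (PySem.List.pyRange 0 rows 1) 0 PySem.Dict.empty).items

-- ===== PRECONDITION & SPEC =====
def Spec_auto_layout (class_names : List String) (cols : Int) (col_w : Int) (row_h : Int) (start_x : Int) (start_y : Int) (out : List (String × Int × Int)) : Prop := out = auto_layout_alt class_names cols col_w row_h start_x start_y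
instance (class_names : List String) (cols : Int) (col_w : Int) (row_h : Int) (start_x : Int) (start_y : Int) (out : List (String × Int × Int)) : Decidable (Spec_auto_layout class_names cols col_w row_h start_x start_y out) := by unfold Spec_auto_layout; infer_instance

-- ===== CLAIM (what is proved, stated in full; the proofs are below) =====
def Claim_equal_auto_layout : Prop := ∀ (class_names : List String) (cols : Int) (col_w : Int) (row_h : Int) (start_x : Int) (start_y : Int), Dom_auto_layout class_names cols col_w row_h start_x start_y → Spec_auto_layout class_names cols col_w row_h start_x start_y (auto_layout class_names cols col_w row_h start_x start_y)

-- ===== LEMMAS AND PROOFS =====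

-- the common per-index insertion both programs perform at index i
def stepF (class_names : List String) (cols col_w row_h start_x start_y : Int)
    (d : PySem.Dict String (Int × Int)) (i : Int) : PySem.Dict String (Int × Int) :=
  d.insert (PySem.List.pyGetD class_names i "")
    (start_x + PySem.Int.mod i cols * col_w, start_y + PySem.Int.floordiv i cols * row_h)

theorem bInner_spec (class_names : List String) (n cols col_w row_h start_x start_y row : Int)
    (hcols : 0 < cols) :
    ∀ (c idx : Int) (d : PySem.Dict String (Int × Int)),
      0 ≤ c → c ≤ cols → idx = row * cols + c → idx ≤ n →
      bInner class_names n cols col_w row_h start_x start_y row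
          (PySem.List.pyRange c cols 1) idx d
        = (min ((row + 1) * cols) n,
           (PySem.List.pyRange idx (min ((row + 1) * cols) n) 1).foldl
             (stepF class_names cols col_w row_h start_x start_y) d) := by
  have key : ∀ (k : Nat) (c idx : Int) (d : PySem.Dict String (Int × Int)),
      (cols - c).toNat = k →
      0 ≤ c → c ≤ cols → idx = row * cols + c → idx ≤ n →
      bInner class_names n cols col_w row_h start_x start_y row
          (PySem.List.pyRange c cols 1) idx d
        = (min ((row + 1) * cols) n,
           (PySem.List.pyRange idx (min ((row + 1) * cols) n) 1).foldl
             (stepF class_names cols col_w row_h start_x start_y) d) := by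
    intro k
    induction k with
    | zero =>
      intro c idx d hk hc hcc hidx hin
      have hceq : c = cols := by omega
      have hexp : (row + 1) * cols = row * cols + cols := by ring
      obtain ⟨rc, hrc⟩ : ∃ rc : Int, row * cols = rc := ⟨_, rfl⟩
      have h1 : min ((row + 1) * cols) n = idx := by
        rw [hexp, hrc]; rw [hrc] at hidx; omega
      have he1 : PySem.List.pyRange c cols 1 = [] := by
        rw [PySem.List.pyRange_one]
        simp [show (cols - c).toNat = 0 by omega]
      have he2 : PySem.List.pyRange idx (min ((row + 1) * cols) n) 1 = [] := by
        rw [h1, PySem.List.pyRange_one]; simp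
      rw [he1, he2, h1]
      rfl
    | succ k ih =>
      intro c idx d hk hc hcc hidx hin
      have hclt : c < cols := by omega
      have hexp : (row + 1) * cols = row * cols + cols := by ring
      rw [PySem.List.pyRange_one_cons hclt]
      simp only [bInner]
      by_cases hni : n ≤ idx
      · rw [if_pos hni]
        obtain ⟨rc, hrc⟩ : ∃ rc : Int, row * cols = rc := ⟨_, rfl⟩
        have h1 : min ((row + 1) * cols) n = idx := by
          rw [hexp, hrc]; rw [hrc] at hidx; omega
        have he2 : PySem.List.pyRange idx (min ((row + 1) * cols) n) 1 = [] := by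
          rw [h1, PySem.List.pyRange_one]; simp
        rw [he2, h1]
        rfl
      · rw [if_neg hni]
        have hidxn : idx < n := by omega
        have hm : PySem.Int.mod idx cols = c := by
          rw [PySem.Int.mod_eq_emod_of_pos hcols, hidx,
            show row * cols + c = c + row * cols from by ring,
            Int.add_mul_emod_self_right, Int.emod_eq_of_lt hc hclt]
        have hdv : PySem.Int.floordiv idx cols = row := by
          rw [PySem.Int.floordiv_eq_ediv_of_pos hcols, hidx,
            show row * cols + c = c + row * cols from by ring,
            Int.add_mul_ediv_right _ _ (ne_of_gt hcols),
            Int.ediv_eq_zero_of_lt hc hclt, zero_add]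
        have hlt : idx < min ((row + 1) * cols) n := by
          obtain ⟨rc, hrc⟩ : ∃ rc : Int, row * cols = rc := ⟨_, rfl⟩
          rw [hexp, hrc]; rw [hrc] at hidx; omega
        rw [ih (c + 1) (idx + 1) _ (by omega) (by omega) (by omega)
            (by rw [hidx]; ring) (by omega)]
        rw [PySem.List.pyRange_one_cons hlt, List.foldl_cons]
        simp only [stepF, hm, hdv]
  intro c idx d
  exact key (cols - c).toNat c idx d rfl

theorem bInner_break (class_names : List String) (n cols col_w row_h start_x start_y row : Int)
    (L : List Int) (idx : Int) (d : PySem.Dict String (Int × Int)) (h : n ≤ idx) :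
    bInner class_names n cols col_w row_h start_x start_y row L idx d = (idx, d) := by
  cases L <;> simp [bInner, h]

theorem bOuter_spec (class_names : List String) (n cols col_w row_h start_x start_y rows : Int)
    (hcols : 0 < cols) :
    ∀ (r idx : Int) (d : PySem.Dict String (Int × Int)),
      0 ≤ r → r ≤ rows → idx = min (r * cols) n →
      bOuter class_names n cols col_w row_h start_x start_y
          (PySem.List.pyRange r rows 1) idx d
        = (PySem.List.pyRange idx (min (rows * cols) n) 1).foldl
            (stepF class_names cols col_w row_h start_x start_y) d := by
  have key : ∀ (k : Nat) (r idx : Int) (d : PySem.Dict String (Int × Int)),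
      (rows - r).toNat = k →
      0 ≤ r → r ≤ rows → idx = min (r * cols) n →
      bOuter class_names n cols col_w row_h start_x start_y
          (PySem.List.pyRange r rows 1) idx d
        = (PySem.List.pyRange idx (min (rows * cols) n) 1).foldl
            (stepF class_names cols col_w row_h start_x start_y) d := by
    intro k
    induction k with
    | zero =>
      intro r idx d hk hr hrr hidx
      have hreq : r = rows := by omega
      subst hreq
      have he1 : PySem.List.pyRange r r 1 = [] := by
        rw [PySem.List.pyRange_one]; simp
      have he2 : PySem.List.pyRange idx (min (r * cols) n) 1 = [] := by
        rw [← hidx, PySem.List.pyRange_one]; simp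
      rw [he1, he2]
      rfl
    | succ k ih =>
      intro r idx d hk hr hrr hidx
      have hrlt : r < rows := by omega
      rw [PySem.List.pyRange_one_cons hrlt]
      simp only [bOuter]
      have hexp : (r + 1) * cols = r * cols + cols := by ring
      have hmono : r * cols ≤ (r + 1) * cols := by nlinarith
      have hmono2 : (r + 1) * cols ≤ rows * cols := by nlinarith
      by_cases hcase : r * cols ≤ n
      · have hidx' : idx = r * cols := by omega
        rw [bInner_spec class_names n cols col_w row_h start_x start_y r hcols
            0 idx d le_rfl (le_of_lt hcols) (by rw [hidx']; ring) (by omega)]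
        rw [ih (r + 1) (min ((r + 1) * cols) n) _ (by omega) (by omega) (by omega) rfl]
        rw [← List.foldl_append,
          ← PySem.List.pyRange_one_append idx (min ((r + 1) * cols) n) (min (rows * cols) n)
            (by omega) (by omega)]
      · have hidx' : idx = n := by omega
        rw [bInner_break class_names n cols col_w row_h start_x start_y r _ idx d (by omega)]
        exact ih (r + 1) idx d (by omega) (by omega) (by omega) (by omega)
  intro r idx d
  exact key (rows - r).toNat r idx d rfl

-- ===== VERDICT (by name: the statement is the Claim_ definition above) =====
theorem auto_layout_spec : Claim_equal_auto_layout := by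
  intro class_names cols col_w row_h start_x start_y _
  unfold Spec_auto_layout auto_layout auto_layout_alt
  by_cases h0 : ((class_names.length : Int) == 0) = true
  · simp only [h0, if_true]
  · simp only [h0]
    have hn : (0 : Int) < class_names.length := by
      have hne : class_names ≠ [] := by simpa using h0
      have := List.length_pos_iff.mpr hne
      omega
    set C : Int := if (class_names.length : Int) ≤ 3 then 1
      else if (class_names.length : Int) ≤ 6 then 2
      else if (class_names.length : Int) ≤ 12 then 3 else 4 with hC
    have hCpos : (0 : Int) < C := by rw [hC]; split_ifs <;> norm_num
    set R : Int := PySem.Int.floordiv ((class_names.length : Int) + C - 1) C with hR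
    have hRed : R = ((class_names.length : Int) + C - 1) / C := by
      rw [hR, PySem.Int.floordiv_eq_ediv_of_pos hCpos]
    have hmod := Int.emod_nonneg ((class_names.length : Int) + C - 1) (ne_of_gt hCpos)
    have hmod2 := Int.emod_lt_of_pos ((class_names.length : Int) + C - 1) hCpos
    have hdm := Int.mul_ediv_add_emod ((class_names.length : Int) + C - 1) C
    obtain ⟨rc, hrc⟩ : ∃ rc : Int, C * (((class_names.length : Int) + C - 1) / C) = rc := ⟨_, rfl⟩
    have hRC : (class_names.length : Int) ≤ R * C := by
      rw [hRed, mul_comm, hrc]; omega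
    have hR0 : 0 ≤ R := by
      rw [hRed]
      exact Int.ediv_nonneg (by omega) (by omega)
    rw [bOuter_spec class_names (class_names.length : Int) C col_w row_h start_x start_y R
        hCpos (0:Int) 0 PySem.Dict.empty le_rfl hR0 (by simp)]
    rw [min_eq_right hRC]
    rw [PySem.List.enumerate_eq_map_pyRange class_names "", List.foldl_map]
    rfl
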